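-- pv_equiv track=rewrite | github.com/JoshuaSchell/ptxbench-temp | src/ptxbench/providers.py | _safe_command_shape
-- ===== SOURCE A (Python) =====
-- def _safe_command_shape(command: list[str]) -> list[str]:
--     """Return argv shape only; prompts and environment variables are never included."""
--     shape: list[str] = []
--     previous_sensitive = False
--     sensitive_tokens = ("key", "token", "secret", "password")
--     for index, arg in enumerate(command):
--         lowered = arg.lower()
--         is_sensitive_flag = arg.startswith("-") and any(token in lowered for token in sensitive_tokens)
--         if index == 0:
--             shape.append(arg)
--         elif previous_sensitive:
--             shape.append("<redacted>")
--         elif "=" in arg and any(token in lowered.split("=", 1)[0] for token in sensitive_tokens):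
--             shape.append(arg.split("=", 1)[0] + "=<redacted>")
--         elif arg.startswith("-"):
--             shape.append(arg)
--         else:
--             shape.append("<arg>")
--         previous_sensitive = is_sensitive_flag
--     return shape
-- ===== SOURCE B (Python) =====
-- def _safe_command_shape(command: list[str]) -> list[str]:
--     """Return argv shape only; prompts and environment variables are never included."""
--     sensitive_tokens = ("key", "token", "secret", "password")
--
--     def hot(a):
--         return a.startswith("-") and any(t in a.lower() for t in sensitive_tokens)
--
--     def base(a):
--         lowered = a.lower()
--         if "=" in a and any(t in lowered.split("=", 1)[0] for t in sensitive_tokens):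
--             return a.split("=", 1)[0] + "=<redacted>"
--         if a.startswith("-"):
--             return a
--         return "<arg>"
--
--     if not command:
--         return []
--     n = len(command)
--     out = [command[0]]
--     i = 1
--     while i < n:
--         if hot(command[i - 1]):
--             # jump over the whole run of sensitive flags, redacting the block at once
--             j = i
--             while j < n and hot(command[j]):
--                 j += 1
--             k = min(j + 1, n)
--             out.extend(["<redacted>"] * (k - i))
--             i = k
--         else:
--             out.append(base(command[i]))
--             i += 1
--     return out
-- ===== Notes on version B (the rewrite author's own statement) =====
-- stated objective: alternative
-- what changed: Replaces A's per-element pass threading a previous_sensitive boolean with a run-skipping scanner: the index jumps over each maximal run of sensitive flags and emits the whole block of '<redacted>' entries at once, handling non-sensitive arguments by a pure per-element rendering.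
import Mathlib
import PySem

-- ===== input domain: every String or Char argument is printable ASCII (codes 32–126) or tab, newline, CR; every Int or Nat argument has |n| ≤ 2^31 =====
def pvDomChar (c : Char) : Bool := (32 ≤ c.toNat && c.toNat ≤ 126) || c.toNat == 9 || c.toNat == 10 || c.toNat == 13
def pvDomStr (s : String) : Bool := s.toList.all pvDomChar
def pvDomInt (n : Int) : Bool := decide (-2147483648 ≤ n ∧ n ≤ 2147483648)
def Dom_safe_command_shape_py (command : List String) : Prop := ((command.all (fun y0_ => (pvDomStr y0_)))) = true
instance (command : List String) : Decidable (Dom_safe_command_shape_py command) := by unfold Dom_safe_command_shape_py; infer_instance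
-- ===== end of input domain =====

-- ===== PORT A =====
-- B replaces A's stateful per-element pass (threaded previous_sensitive flag) with a
-- run-skipping scanner that jumps over maximal runs of sensitive flags and emits the
-- '<redacted>' block at once; same return value. (objective: alternative)

-- string concatenation a + b, via PySem.Str.join (used identically by both ports)
def pvCat (a b : String) : String := PySem.Str.join "" [a, b]

def pvTokens : List String := ["key", "token", "secret", "password"]

-- literal port of A's loop: state (shape, previous_sensitive), indices via enumerate
def safe_command_shape_py (command : List String) : List String :=
  ((PySem.List.enumerate command 0).foldl (fun st p =>
    let arg := p.2
    let lowered := PySem.Str.lower arg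
    let is_sensitive_flag :=
      PySem.Str.startswith arg "-" && pvTokens.any (fun t => PySem.Str.isIn t lowered)
    let shape :=
      if p.1 == 0 then st.1 ++ [arg]
      else if st.2 then st.1 ++ ["<redacted>"]
      else if PySem.Str.isIn "=" arg &&
              pvTokens.any (fun t =>
                PySem.Str.isIn t (((PySem.Str.splitMax? lowered "=" 1).getD []).headD "")) then
        st.1 ++ [pvCat (((PySem.Str.splitMax? arg "=" 1).getD []).headD "") "=<redacted>"]
      else if PySem.Str.startswith arg "-" then st.1 ++ [arg]
      else st.1 ++ ["<arg>"]
    (shape, is_sensitive_flag)) ([], false)).1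

-- ===== PORT B =====
-- hot(a): does a look like a sensitive flag
def pvHot (a : String) : Bool :=
  PySem.Str.startswith a "-" && pvTokens.any (fun t => PySem.Str.isIn t (PySem.Str.lower a))

-- base(a): per-element rendering of a non-head argument whose predecessor is not hot
def pvBase (a : String) : String :=
  let lowered := PySem.Str.lower a
  if PySem.Str.isIn "=" a &&
      pvTokens.any (fun t =>
        PySem.Str.isIn t (((PySem.Str.splitMax? lowered "=" 1).getD []).headD "")) then
    pvCat (((PySem.Str.splitMax? a "=" 1).getD []).headD "") "=<redacted>"
  else if PySem.Str.startswith a "-" then a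
  else "<arg>"

-- inner while loop of Source B: advance j while command[j] is hot
def pvRunEnd (command : List String) (j : Nat) : Nat :=
  if _h : j < command.length ∧ pvHot (command.getD j "") = true then
    pvRunEnd command (j + 1)
  else j
termination_by command.length - j
decreasing_by omega

-- termination fact for pvGo, cited by its decreasing_by
theorem pvRunEnd_ge (command : List String) (j : Nat) : j ≤ pvRunEnd command j := by
  unfold pvRunEnd
  split
  · exact Nat.le_trans (Nat.le_succ j) (pvRunEnd_ge command (j + 1))
  · exact Nat.le_refl j
termination_by command.length - j
decreasing_by omega

-- outer while loop of Source B
def pvGo (command : List String) (i : Nat) (out : List String) : List String :=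
  if _h : i < command.length then
    if pvHot (command.getD (i - 1) "") then
      let j := pvRunEnd command i
      let k := min (j + 1) command.length
      pvGo command k (out ++ List.replicate (k - i) "<redacted>")
    else
      pvGo command (i + 1) (out ++ [pvBase (command.getD i "")])
  else out
termination_by command.length - i
decreasing_by
  · have := pvRunEnd_ge command i; omega
  · omega

def safe_command_shape_py_alt (command : List String) : List String :=
  match command with
  | [] => []
  | x :: _ => pvGo command 1 [x]

-- ===== PRECONDITION & SPEC =====
def Spec_safe_command_shape_py (command : List String) (out : List String) : Prop := out = safe_command_shape_py_alt command
instance (command : List String) (out : List String) : Decidable (Spec_safe_command_shape_py command out) := by unfold Spec_safe_command_shape_py; infer_instance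

-- ===== CLAIM (what is proved, stated in full; the proofs are below) =====
def Claim_equal_safe_command_shape_py : Prop := ∀ (command : List String), Dom_safe_command_shape_py command → Spec_safe_command_shape_py command (safe_command_shape_py command)

-- ===== LEMMAS AND PROOFS =====

-- canonical form both ports are reduced to
def pvRender (prev arg : String) : String :=
  if pvHot prev then "<redacted>" else pvBase arg

def pvP (c : List String) : List String :=
  (c.zip c.tail).map (fun p => pvRender p.1 p.2)

-- A's loop body, named for the lemmas below
def pvBodyA (st : List String × Bool) (p : Int × String) : List String × Bool :=
  let arg := p.2
  let lowered := PySem.Str.lower arg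
  let is_sensitive_flag :=
    PySem.Str.startswith arg "-" && pvTokens.any (fun t => PySem.Str.isIn t lowered)
  let shape :=
    if p.1 == 0 then st.1 ++ [arg]
    else if st.2 then st.1 ++ ["<redacted>"]
    else if PySem.Str.isIn "=" arg &&
            pvTokens.any (fun t =>
              PySem.Str.isIn t (((PySem.Str.splitMax? lowered "=" 1).getD []).headD "")) then
      st.1 ++ [pvCat (((PySem.Str.splitMax? arg "=" 1).getD []).headD "") "=<redacted>"]
    else if PySem.Str.startswith arg "-" then st.1 ++ [arg]
    else st.1 ++ ["<arg>"]
  (shape, is_sensitive_flag)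

lemma safe_command_shape_py_eq_foldl (command : List String) :
    safe_command_shape_py command =
      ((PySem.List.enumerate command 0).foldl pvBodyA ([], false)).1 := rfl

-- one non-initial step of A's loop equals pvRender of the (previous, current) pair
lemma pvBodyA_pos (acc : List String) (p y : String) (i : Int) (hi : i ≠ 0) :
    pvBodyA (acc, pvHot p) (i, y) = (acc ++ [pvRender p y], pvHot y) := by
  simp only [pvBodyA, pvRender, pvBase, pvHot]
  have : (i == 0) = false := by simpa using hi
  rw [this]
  split_ifs <;> simp_all

-- the tail of A's loop, started with flag = pvHot p, appends the rendered pairs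
lemma pvTail (xs : List String) : ∀ (p : String) (acc : List String) (s : Int), 1 ≤ s →
    ((PySem.List.enumerate xs s).foldl pvBodyA (acc, pvHot p)).1 =
      acc ++ ((p :: xs).zip xs).map (fun q => pvRender q.1 q.2) := by
  induction xs with
  | nil => intro p acc s _; simp [PySem.List.enumerate_nil]
  | cons y ys ih =>
      intro p acc s hs
      rw [PySem.List.enumerate_cons, List.foldl_cons,
        pvBodyA_pos acc p y s (by omega)]
      rw [ih y (acc ++ [pvRender p y]) (s + 1) (by omega)]
      simp [List.zip]

-- A's port in canonical form
lemma pvA_canon (command : List String) :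
    safe_command_shape_py command = command.take 1 ++ pvP command := by
  cases command with
  | nil => rfl
  | cons x xs =>
      rw [safe_command_shape_py_eq_foldl, PySem.List.enumerate_cons, List.foldl_cons]
      have h0 : pvBodyA ([], false) (0, x) = ([x], pvHot x) := by
        simp [pvBodyA, pvHot]
      rw [h0, pvTail xs x [x] (0 + 1) (by omega)]
      simp [pvP, List.zip]

lemma pvP_length (c : List String) (h : 1 ≤ c.length) :
    (pvP c).length = c.length - 1 := by
  simp [pvP]

lemma pvP_getD (c : List String) : ∀ (i : Nat), i + 1 < c.length →
    (pvP c).getD i "" = pvRender (c.getD i "") (c.getD (i + 1) "") := by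
  induction c with
  | nil => intro i h; simp at h
  | cons x xs ih =>
      intro i h
      cases xs with
      | nil => simp at h
      | cons y ys =>
          cases i with
          | zero => simp [pvP, List.zip]
          | succ m =>
              have := ih m (by simpa using h)
              simpa [pvP, List.zip] using this

-- the hot-run block of Source B equals the corresponding segment of pvP
lemma pvRun_drop (c : List String) : ∀ (m i : Nat), c.length - i ≤ m → 1 ≤ i → i ≤ c.length →
    pvHot (c.getD (i - 1) "") = true →
    List.replicate (min (pvRunEnd c i + 1) c.length - i) "<redacted>" ++
      (pvP c).drop (min (pvRunEnd c i + 1) c.length - 1) = (pvP c).drop (i - 1) := by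
  intro m
  induction m with
  | zero =>
      intro i hm h1 hn hhot
      have hi : i = c.length := by omega
      rw [pvRunEnd]
      have : ¬ (i < c.length ∧ pvHot (c.getD i "") = true) := by omega
      rw [dif_neg this]
      have hk : min (i + 1) c.length = c.length := by omega
      rw [hk]
      simp [hi]
  | succ m ih =>
      intro i hm h1 hn hhot
      rw [pvRunEnd]
      by_cases hc : i < c.length ∧ pvHot (c.getD i "") = true
      · rw [dif_pos hc]
        have hrec := ih (i + 1) (by omega) (by omega) (by omega) (by simpa using hc.2)
        have hge : i + 1 ≤ pvRunEnd c (i + 1) := pvRunEnd_ge c (i + 1)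
        set k := min (pvRunEnd c (i + 1) + 1) c.length with hk
        have hki : i + 1 ≤ k := by omega
        have hlen : (pvP c).length = c.length - 1 := pvP_length c (by omega)
        have hdrop : (pvP c).drop (i - 1) =
            (pvP c).getD (i - 1) "" :: (pvP c).drop i := by
          have hlt : i - 1 < (pvP c).length := by omega
          have h3 : i - 1 + 1 = i := by omega
          rw [List.getD_eq_getElem _ _ hlt, List.drop_eq_getElem_cons hlt, h3]
        have hred : (pvP c).getD (i - 1) "" = "<redacted>" := by
          rw [pvP_getD c (i - 1) (by omega)]
          have : i - 1 + 1 = i := by omega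
          rw [pvRender, this, hhot, if_pos rfl]
        rw [hdrop, hred]
        have hrepl : List.replicate (k - i) "<redacted>" =
            "<redacted>" :: List.replicate (k - (i + 1)) "<redacted>" := by
          have : k - i = (k - (i + 1)) + 1 := by omega
          rw [this, List.replicate_succ]
        rw [hrepl]
        simp only [List.cons_append, List.cons.injEq, true_and]
        have : i + 1 - 1 = i := by omega
        rw [this] at hrec
        exact hrec
      · rw [dif_neg hc]
        rcases Nat.lt_or_ge i c.length with hlt | hge
        · have hk : min (i + 1) c.length = i + 1 := by omega
          rw [hk]
          have hlen : (pvP c).length = c.length - 1 := pvP_length c (by omega)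
          have hlt1 : i - 1 < (pvP c).length := by omega
          rw [List.drop_eq_getElem_cons hlt1]
          have hred : (pvP c)[i - 1] = "<redacted>" := by
            rw [← List.getD_eq_getElem _ "" hlt1, pvP_getD c (i - 1) (by omega)]
            have : i - 1 + 1 = i := by omega
            rw [pvRender, this, hhot, if_pos rfl]
          rw [hred]
          have h1' : i + 1 - i = 1 := by omega
          have h2' : i + 1 - 1 = i := by omega
          have h3' : i - 1 + 1 = i := by omega
          rw [h1', h2', List.replicate_one]
          simp [h3']
        · have hi : i = c.length := by omega
          have hk : min (i + 1) c.length = c.length := by omega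
          rw [hk]
          simp [hi]

-- main invariant of Source B's outer loop
lemma pvGo_spec (c : List String) : ∀ (m i : Nat) (out : List String),
    c.length - i ≤ m → 1 ≤ i →
    pvGo c i out = out ++ (pvP c).drop (i - 1) := by
  intro m
  induction m with
  | zero =>
      intro i out hm h1
      rw [pvGo]
      have hni : ¬ i < c.length := by omega
      rw [dif_neg hni]
      have hlen : (pvP c).length ≤ i - 1 := by
        rcases Nat.eq_zero_or_pos c.length with h0 | hp
        · simp [pvP, List.length_eq_zero_iff.mp h0]
        · rw [pvP_length c hp]; omega
      rw [List.drop_eq_nil_of_le hlen, List.append_nil]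
  | succ m ih =>
      intro i out hm h1
      rw [pvGo]
      by_cases hlt : i < c.length
      · rw [dif_pos hlt]
        by_cases hhot : pvHot (c.getD (i - 1) "") = true
        · rw [if_pos hhot]
          have hge : i ≤ pvRunEnd c i := pvRunEnd_ge c i
          set k := min (pvRunEnd c i + 1) c.length with hk
          have hki : i + 1 ≤ k := by omega
          rw [ih k (out ++ List.replicate (k - i) "<redacted>") (by omega) (by omega)]
          rw [List.append_assoc]
          congr 1
          exact pvRun_drop c (c.length - i) i (by omega) h1 (by omega) hhot
        · rw [if_neg hhot]
          rw [ih (i + 1) (out ++ [pvBase (c.getD i "")]) (by omega) (by omega)]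
          rw [List.append_assoc]
          congr 1
          have hlen : (pvP c).length = c.length - 1 := pvP_length c (by omega)
          have hlt1 : i - 1 < (pvP c).length := by omega
          rw [List.drop_eq_getElem_cons hlt1]
          have hbase : (pvP c)[i - 1] = pvBase (c.getD i "") := by
            rw [← List.getD_eq_getElem _ "" hlt1, pvP_getD c (i - 1) (by omega)]
            have h3' : i - 1 + 1 = i := by omega
            rw [pvRender, h3']
            rw [if_neg (by simpa using hhot)]
          have h2' : i + 1 - 1 = i := by omega
          have h4' : i - 1 + 1 = i := by omega
          rw [hbase, h2', h4']
          rfl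
      · rw [dif_neg hlt]
        have hlen : (pvP c).length ≤ i - 1 := by
          rcases Nat.eq_zero_or_pos c.length with h0 | hp
          · simp [pvP, List.length_eq_zero_iff.mp h0]
          · rw [pvP_length c hp]; omega
        rw [List.drop_eq_nil_of_le hlen, List.append_nil]

-- B's port in canonical form
lemma pvB_canon (command : List String) :
    safe_command_shape_py_alt command = command.take 1 ++ pvP command := by
  cases command with
  | nil => rfl
  | cons x xs =>
      show pvGo (x :: xs) 1 [x] = _
      rw [pvGo_spec (x :: xs) ((x :: xs).length - 1) 1 [x] (by omega) (by omega)]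
      simp

-- ===== VERDICT (by name: the statement is the Claim_ definition above) =====
theorem safe_command_shape_py_spec : Claim_equal_safe_command_shape_py := by
  intro command _
  show safe_command_shape_py command = safe_command_shape_py_alt command
  rw [pvA_canon, pvB_canon]
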